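-- pv_equiv track=rewrite | github.com/Usman600/Space-Optimizer1 | Algo test.py | resize_2d_array
-- ===== SOURCE A (Python) =====
-- def resize_2d_array(arr, container):
--     # Create a new 2D array with the desired size
--     if len(arr) <= len(container) and len(arr[0]) <= len(container[0]):
--         new_rows, new_columns = len(container), len(container[0])
--         new_arr = [[0] * new_columns for _ in range(new_rows)]
--
--         # Copy elements from the old array to the new array
--         for i in range(min(len(arr), new_rows)):
--             for j in range(min(len(arr[0]), new_columns)):
--                 new_arr[i][j] = arr[i][j]
--         return new_arr
--     return 0
-- ===== SOURCE B (Python) =====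
-- def resize_2d_array(arr, container):
--     # Same fit-check guard as A, then build rows directly (pad with zeros)
--     # instead of allocating a zero grid and overwriting it.
--     if len(arr) <= len(container) and len(arr[0]) <= len(container[0]):
--         w = len(arr[0])
--         ncols = len(container[0])
--         out = [[row[j] for j in range(w)] + [0] * (ncols - w) for row in arr]
--         out += [[0] * ncols for _ in range(len(container) - len(arr))]
--         return out
--     return 0
-- ===== Notes on version B (the rewrite author's own statement) =====
-- stated objective: simpler
-- what changed: B builds each output row directly (copied prefix plus zero padding) and appends the remaining all-zero rows, instead of allocating a full zero grid and overwriting cells with nested index loops.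
-- outside the precondition, e.g. on resize_2d_array([[1, 2]], [[0]]): A returns 0, B returns 0
import Mathlib
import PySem

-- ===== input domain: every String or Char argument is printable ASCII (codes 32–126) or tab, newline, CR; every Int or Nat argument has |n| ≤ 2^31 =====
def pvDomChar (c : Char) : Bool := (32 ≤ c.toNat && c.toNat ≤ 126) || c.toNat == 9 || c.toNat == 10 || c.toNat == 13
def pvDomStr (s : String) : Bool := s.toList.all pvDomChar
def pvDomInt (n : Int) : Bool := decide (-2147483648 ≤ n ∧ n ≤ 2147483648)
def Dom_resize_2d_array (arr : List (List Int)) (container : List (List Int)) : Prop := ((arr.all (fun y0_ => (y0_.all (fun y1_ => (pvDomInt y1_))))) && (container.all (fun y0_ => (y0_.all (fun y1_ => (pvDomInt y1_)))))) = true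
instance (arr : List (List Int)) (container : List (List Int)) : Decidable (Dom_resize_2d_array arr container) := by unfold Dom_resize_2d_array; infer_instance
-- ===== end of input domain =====

-- B builds each output row directly (copied prefix + zero padding) and appends the
-- remaining zero rows, instead of A's allocate-zero-grid-then-overwrite; objective: simpler.


-- ===== PORT A =====
-- indexing (arr[0], container[0], arr[i][j], new_arr[i][j] =) is in range on every
-- input admitted by Pre_; getD/headD stand for Python indexing exactly there.
def resize_2d_array (arr : List (List Int)) (container : List (List Int)) : List (List Int) :=
  if arr.length ≤ container.length ∧ (arr.headD []).length ≤ (container.headD []).length then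
    let new_rows := container.length
    let new_columns := (container.headD []).length
    let new_arr := (List.range new_rows).map (fun _ => List.replicate new_columns (0 : Int))
    (List.range (min arr.length new_rows)).foldl (fun g i =>
      (List.range (min (arr.headD []).length new_columns)).foldl (fun g' j =>
        g'.modify i (fun row => row.set j ((arr.getD i []).getD j 0))) g) new_arr
  else
    []  -- Python returns 0 here (an int, not a list of lists); excluded by Pre_

-- ===== PORT B =====
def resize_2d_array_alt (arr : List (List Int)) (container : List (List Int)) : List (List Int) :=
  if arr.length ≤ container.length ∧ (arr.headD []).length ≤ (container.headD []).length then
    let w := (arr.headD []).length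
    let ncols := (container.headD []).length
    (arr.map (fun row => (List.range w).map (fun j => row.getD j 0) ++ List.replicate (ncols - w) (0 : Int)))
      ++ (List.range (container.length - arr.length)).map (fun _ => List.replicate ncols (0 : Int))
  else
    []  -- Python returns 0 here; excluded by Pre_

-- ===== PRECONDITION & SPEC =====
-- Pre_ excludes: empty arr or container (A raises IndexError on arr[0]/container[0]),
-- inputs failing the fit-check (A returns the int 0, not a list of lists), and arrays
-- with a row shorter than row 0 (A raises IndexError reading arr[i][j]).
def Pre_resize_2d_array (arr : List (List Int)) (container : List (List Int)) : Prop :=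
  arr ≠ [] ∧ container ≠ [] ∧
  arr.length ≤ container.length ∧ (arr.headD []).length ≤ (container.headD []).length ∧
  ∀ row ∈ arr, (arr.headD []).length ≤ row.length
instance (arr : List (List Int)) (container : List (List Int)) : Decidable (Pre_resize_2d_array arr container) := by unfold Pre_resize_2d_array; infer_instance

def pvWitness_resize_2d_array : List (List Int) × List (List Int) :=
  ([[1, 2]], [[0, 0, 0], [0, 0, 0]])

def Spec_resize_2d_array (arr : List (List Int)) (container : List (List Int)) (out : List (List Int)) : Prop := out = resize_2d_array_alt arr container
instance (arr : List (List Int)) (container : List (List Int)) (out : List (List Int)) : Decidable (Spec_resize_2d_array arr container out) := by unfold Spec_resize_2d_array; infer_instance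

-- ===== CLAIM (what is proved, stated in full; the proofs are below) =====
def Claim_equal_resize_2d_array : Prop := ∀ (arr : List (List Int)) (container : List (List Int)), Dom_resize_2d_array arr container → Pre_resize_2d_array arr container → Spec_resize_2d_array arr container (resize_2d_array arr container)

-- ===== LEMMAS AND PROOFS =====

-- Inner loop of A collapses, cell-wise: repeated modifications at one row index i.
theorem pv_inner_get (v : Nat → Int) (js : List Nat) :
    ∀ (g : List (List Int)) (i m : Nat),
    (js.foldl (fun g' j => g'.modify i (fun row => row.set j (v j))) g)[m]? =
      if i = m then (g[m]?).map (fun r => js.foldl (fun r j => r.set j (v j)) r) else g[m]? := by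
  induction js with
  | nil => intro g i m; by_cases h : i = m <;> simp [h]
  | cons j js ih =>
    intro g i m
    simp only [List.foldl_cons, ih, List.getElem?_modify]
    by_cases h : i = m
    · subst h
      simp only [if_true]
      cases g[i]? <;> rfl
    · simp [h]

-- Outer loop of A, cell-wise.
theorem pv_outer_get (val : Nat → Nat → Int) (W : Nat) (n : Nat) :
    ∀ (g : List (List Int)) (m : Nat),
    ((List.range n).foldl (fun g i => (List.range W).foldl (fun g' j =>
        g'.modify i (fun row => row.set j (val i j))) g) g)[m]? =
      if m < n then (g[m]?).map (fun r => (List.range W).foldl (fun r j => r.set j (val m j)) r)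
      else g[m]? := by
  induction n with
  | zero => intro g m; simp
  | succ n ih =>
    intro g m
    rw [List.range_succ, List.foldl_append, List.foldl_cons, List.foldl_nil,
        pv_inner_get (val n) (List.range W), ih]
    by_cases h : n = m
    · subst h; simp
    · rcases Nat.lt_trichotomy m n with hm | hm | hm
      · simp [h, hm, Nat.lt_succ_of_lt hm]
      · omega
      · have : ¬ m < n := by omega
        have : ¬ m < n + 1 := by omega
        simp [*]

-- The row loop, starting from a zero row, produces copied prefix + zero padding.
theorem pv_row (row : List Int) (w C : Nat) (hw : w ≤ C) :
    (List.range w).foldl (fun r j => r.set j (row.getD j 0)) (List.replicate C (0 : Int)) =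
      (List.range w).map (fun j => row.getD j 0) ++ List.replicate (C - w) 0 := by
  induction w with
  | zero => simp
  | succ w ih =>
    have hw' : w ≤ C := Nat.le_of_succ_le hw
    rw [List.range_succ, List.foldl_append, List.foldl_cons, List.foldl_nil, ih hw',
        List.map_append]
    have hrep : List.replicate (C - w) (0 : Int) = 0 :: List.replicate (C - (w + 1)) 0 := by
      have : C - w = (C - (w + 1)) + 1 := by omega
      rw [this, List.replicate_succ]
    rw [hrep]
    have hlen : ((List.range w).map (fun j => row.getD j 0)).length = w := by simp
    rw [List.set_append_right _ _ (by omega)]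
    simp [List.append_assoc]

theorem resize_2d_array_spec_aux (arr container : List (List Int))
    (h : Pre_resize_2d_array arr container) :
    resize_2d_array arr container = resize_2d_array_alt arr container := by
  obtain ⟨ha, hc, hn, hwC, hrows⟩ := h
  have hguard : arr.length ≤ container.length ∧ (arr.headD []).length ≤ (container.headD []).length :=
    ⟨hn, hwC⟩
  unfold resize_2d_array resize_2d_array_alt
  rw [if_pos hguard, if_pos hguard]
  set w := (arr.headD []).length with hw
  set C := (container.headD []).length with hC
  set n := arr.length with hnn
  set R := container.length with hR
  have hmin1 : min n R = n := Nat.min_eq_left hn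
  have hmin2 : min w C = w := Nat.min_eq_left hwC
  apply List.ext_getElem?
  intro m
  dsimp only
  rw [hmin1, hmin2, pv_outer_get (fun i j => (arr.getD i []).getD j 0) w n]
  have hg0 : ((List.range R).map (fun _ => List.replicate C (0 : Int)))[m]? =
      if m < R then some (List.replicate C 0) else none := by
    by_cases hm : m < R <;> simp [hm]
  rw [hg0]
  have hBlen : (arr.map (fun row => (List.range w).map (fun j => row.getD j 0) ++
      List.replicate (C - w) (0 : Int))).length = n := by simp [hnn]
  by_cases hmn : m < n
  · have hmR : m < R := lt_of_lt_of_le hmn hn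
    rw [List.getElem?_append_left (by omega)]
    simp only [hmn, hmR, if_pos]
    rw [List.getElem?_map]
    have harr : arr[m]? = some (arr.getD m []) := by
      rw [List.getD, List.getElem?_eq_getElem (by omega)]
      simp [hmn]
    rw [harr]
    simp only [Option.map_some]
    rw [pv_row (arr.getD m []) w C hwC]
  · rw [if_neg hmn, List.getElem?_append_right (by omega), hBlen]
    by_cases hmR : m < R
    · rw [List.getElem?_map, List.getElem?_range (show m - n < R - n by omega)]
      simp [hmR]
    · rw [List.getElem?_map, List.getElem?_eq_none (by simp; omega)]
      simp [hmR]

-- ===== VERDICT (by name: the statement is the Claim_ definition above) =====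
theorem resize_2d_array_spec : Claim_equal_resize_2d_array := by
  intro arr container _ hpre
  exact resize_2d_array_spec_aux arr container hpre
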